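-- pv_equiv track=rewrite | github.com/SigmaRichards/MorrowindPotions | scripts/pull_potion_data.py | _get_ni_potions
-- ===== SOURCE A (Python) =====
-- from itertools import combinations
--
-- def potion_from_ings(ref_ings, *ings):
--     """
--     Gets the potion effects given a list of ingredients.
--     Returns as sorted tuple
--     """
--     joined_effs = []
--     known_effs = []
--     for ci in ings:
--         for ce in ref_ings[ci]['effects']:
--             if ce in known_effs:
--                 if ce not in joined_effs:
--                     joined_effs.append(ce)
--             else:
--                 known_effs.append(ce)
--     joined_effs = sorted(joined_effs)
--     return tuple(joined_effs)
--
-- def is_potion_non_trivial(ref_ings, *ings):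
--     """
--     Potion is considered 'trivial' if the exact same
--     effects can be achieved with fewer ingredients
--     """
--     ce = potion_from_ings(ref_ings, *ings)
--     if len(ings) <= 2:
--         return ((len(ce)>0), ce)
--     num_c = len(ings) - 1
--     for cr in combinations(ings, num_c):
--         ne = potion_from_ings(ref_ings, *cr)
--         if ne == ce:
--             return (False, ce)
--     return (True, ce)
--
-- def _get_ni_potions(ings, ni):
--     """
--     Gets all valid, non-trivial potions
--       from 'ni' ingredients from list of
--       all ingredients
--     """
--     out = dict()
--     for cr in combinations(ings, ni):
--         is_nt, ce = is_potion_non_trivial(ings, *cr)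
--         if is_nt:
--             if ce not in out:
--                 out[ce] = []
--             out[ce].append(sorted(cr))
--     return out
-- ===== SOURCE B (Python) =====
-- # Same result as A's _get_ni_potions by a different algorithm: a recursive DFS over the
-- # ingredient list generates each combination while maintaining a running effect-count dict
-- # incrementally (no itertools, no per-combination rescan of all effects); the potion is the
-- # sorted effects counted >= 2, and the leave-one-out triviality test is done by SUBTRACTING
-- # one ingredient's effect counts from the running dict instead of recounting a sub-combination.
-- def _get_ni_potions(ings, ni):
--     out = {}
--
--     def potion(cnt):
--         return tuple(sorted(e for e, n in cnt.items() if n >= 2))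
--
--     def visit(chosen, cnt):
--         ce = potion(cnt)
--         if len(chosen) <= 2:
--             nt = len(ce) > 0
--         else:
--             nt = True
--             for ci in chosen:
--                 c2 = dict(cnt)
--                 for e in ings[ci]['effects']:
--                     c2[e] -= 1
--                 if potion(c2) == ce:
--                     nt = False
--                     break
--         if nt:
--             out.setdefault(ce, []).append(sorted(chosen))
--
--     def rec(names, k, chosen, cnt):
--         if k == 0:
--             visit(chosen, cnt)
--         elif 0 < k <= len(names):
--             x, rest = names[0], names[1:]
--             c2 = dict(cnt)
--             for e in ings[x]['effects']:
--                 c2[e] = c2.get(e, 0) + 1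
--             rec(rest, k - 1, chosen + [x], c2)
--             rec(rest, k, chosen, cnt)
--
--     rec(list(ings), ni, [], {})
--     return out
-- ===== Notes on version B (the rewrite author's own statement) =====
-- stated objective: alternative
-- what changed: B abandons itertools.combinations and per-combination recounting entirely: a recursive DFS over the ingredient list generates each combination while carrying a running effect-count dict extended incrementally on the include-branch, the potion is read off that dict (effects counted >= 2, sorted), and the leave-one-out triviality test subtracts one ingredient's effect counts from the running dict instead of re-deriving each sub-combination's potion from its ingredient lists.
import Mathlib
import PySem

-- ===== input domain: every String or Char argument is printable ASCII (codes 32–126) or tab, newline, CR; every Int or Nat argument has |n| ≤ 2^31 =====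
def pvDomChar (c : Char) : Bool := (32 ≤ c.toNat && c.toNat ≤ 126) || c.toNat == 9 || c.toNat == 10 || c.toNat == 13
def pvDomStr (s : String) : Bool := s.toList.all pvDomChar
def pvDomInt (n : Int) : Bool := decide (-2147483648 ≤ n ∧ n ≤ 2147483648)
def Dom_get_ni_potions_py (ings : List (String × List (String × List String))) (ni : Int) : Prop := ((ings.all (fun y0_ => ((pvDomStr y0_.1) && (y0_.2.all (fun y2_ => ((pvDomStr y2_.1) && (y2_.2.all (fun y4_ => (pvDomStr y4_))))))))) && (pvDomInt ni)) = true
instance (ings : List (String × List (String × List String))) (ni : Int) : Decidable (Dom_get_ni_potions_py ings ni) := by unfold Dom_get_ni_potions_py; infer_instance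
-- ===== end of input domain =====

-- B replaces A's combinations+recount pipeline by a recursive DFS over the ingredient list that
-- carries a running effect-count dict incrementally, reads the potion off that dict (counts ≥ 2,
-- sorted), and tests triviality by subtracting one ingredient's counts; objective: alternative.


-- ===== PORT A =====
-- ref_ings[ci]['effects']  (lookups always succeed inside Pre_; getD defaults are never hit there)
def pvEffA (ref : List (String × List (String × List String))) (ci : String) : List String :=
  PySem.Dict.getD (PySem.Dict.mk (PySem.Dict.getD (PySem.Dict.mk ref) ci [])) "effects" []

-- one step of A's inner loop body (the if/else over joined_effs / known_effs)
def pvStepA (st : List String × List String) (ce : String) : List String × List String :=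
  if ce ∈ st.2 then (if ce ∈ st.1 then st else (st.1 ++ [ce], st.2)) else (st.1, st.2 ++ [ce])

-- potion_from_ings
def pvPotionA (ref : List (String × List (String × List String))) (crs : List String) : List String :=
  let st := crs.foldl (fun st ci => (pvEffA ref ci).foldl pvStepA st) ([], [])
  PySem.List.sorted st.1 (fun x => x)

-- is_potion_non_trivial (the early-return loop becomes an .any)
def pvNontrivA (ref : List (String × List (String × List String))) (cr : List String) :
    Bool × List String :=
  let ce := pvPotionA ref cr
  if cr.length ≤ 2 then (decide (0 < ce.length), ce)
  else if (PySem.List.combinations cr (cr.length - 1)).any (fun c => pvPotionA ref c == ce) then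
    (false, ce)
  else (true, ce)

-- body of A's loop over combinations(ings, ni)
def pvOuterA (ref : List (String × List (String × List String)))
    (out : PySem.Dict (List String) (List (List String))) (cr : List String) :
    PySem.Dict (List String) (List (List String)) :=
  let r := pvNontrivA ref cr
  if r.1 then
    let out1 := if out.contains r.2 then out else out.insert r.2 []
    out1.modify r.2 [] (· ++ [PySem.List.sorted cr (fun x => x)])
  else out

def get_ni_potions_py (ings : List (String × List (String × List String))) (ni : Int) :
    List (List String × List (List String)) :=
  ((PySem.List.combinations (ings.map (·.1)) ni.toNat).foldl (pvOuterA ings)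
    PySem.Dict.empty).items

-- ===== PORT B =====
def pvEffB (ref : List (String × List (String × List String))) (ci : String) : List String :=
  PySem.Dict.getD (PySem.Dict.mk (PySem.Dict.getD (PySem.Dict.mk ref) ci [])) "effects" []

-- potion(cnt): tuple(sorted(e for e, n in cnt.items() if n >= 2))
def pvPotionCnt (cnt : PySem.Dict String Int) : List String :=
  PySem.List.sorted ((cnt.items.filter (fun p => decide ((2 : Int) ≤ p.2))).map (·.1)) (fun x => x)

-- visit(chosen, cnt): the per-combination body (the for/break loop becomes !any; 'c2[e] -= 1' is
-- modify with an unused default — exact here because e is always a key of cnt)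
def pvVisitB (ref : List (String × List (String × List String))) (chosen : List String)
    (cnt : PySem.Dict String Int) (out : PySem.Dict (List String) (List (List String))) :
    PySem.Dict (List String) (List (List String)) :=
  let ce := pvPotionCnt cnt
  let nt :=
    if chosen.length ≤ 2 then decide (0 < ce.length)
    else !(chosen.any (fun ci =>
      pvPotionCnt ((pvEffB ref ci).foldl (fun c e => c.modify e 0 (· - 1)) cnt) == ce))
  if nt then (out.setdefault ce []).modify ce [] (· ++ [PySem.List.sorted chosen (fun x => x)])
  else out

-- rec(names, k, chosen, cnt): DFS generating combinations with the running count dict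
-- ('c2[e] = c2.get(e, 0) + 1' is Dict.modify)
def pvRecB (ref : List (String × List (String × List String))) :
    List String → Nat → List String → PySem.Dict String Int →
    PySem.Dict (List String) (List (List String)) → PySem.Dict (List String) (List (List String))
  | names, 0, chosen, cnt, out =>
      match names with | _ => pvVisitB ref chosen cnt out
  | [], _ + 1, _, _, out => out
  | x :: xs, k + 1, chosen, cnt, out =>
      if (x :: xs).length < k + 1 then out
      else
        let c2 := (pvEffB ref x).foldl (fun c e => c.modify e 0 (· + 1)) cnt
        pvRecB ref xs (k + 1) chosen cnt (pvRecB ref xs k (chosen ++ [x]) c2 out)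

def get_ni_potions_py_alt (ings : List (String × List (String × List String))) (ni : Int) :
    List (List String × List (List String)) :=
  (pvRecB ings (ings.map (·.1)) ni.toNat [] PySem.Dict.empty PySem.Dict.empty).items

-- ===== PRECONDITION & SPEC =====
-- Pre_ excludes: ni < 0 (combinations raises ValueError); association lists with duplicate outer
-- or inner dict keys, which do not represent any Python dict input; and, when 1 ≤ ni ≤ len(ings)
-- (so every ingredient dict is actually read), an ingredient dict missing the key "effects",
-- on which A raises KeyError.
def Pre_get_ni_potions_py (ings : List (String × List (String × List String))) (ni : Int) : Prop :=
  0 ≤ ni ∧ (ings.map (·.1)).Nodup ∧ (∀ p ∈ ings, (p.2.map (·.1)).Nodup) ∧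
    (ni = 0 ∨ (ings.length : Int) < ni ∨ ∀ p ∈ ings, "effects" ∈ p.2.map (·.1))
instance (ings : List (String × List (String × List String))) (ni : Int) : Decidable (Pre_get_ni_potions_py ings ni) := by unfold Pre_get_ni_potions_py; infer_instance

def pvWitness_get_ni_potions_py : (List (String × List (String × List String))) × Int :=
  ([("ash", [("effects", ["heal", "burn"])]), ("bone", [("effects", ["burn", "dark"])])], 2)

def Spec_get_ni_potions_py (ings : List (String × List (String × List String))) (ni : Int) (out : List (List String × List (List String))) : Prop := out = get_ni_potions_py_alt ings ni
instance (ings : List (String × List (String × List String))) (ni : Int) (out : List (List String × List (List String))) : Decidable (Spec_get_ni_potions_py ings ni out) := by unfold Spec_get_ni_potions_py; infer_instance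

-- ===== CLAIM (what is proved, stated in full; the proofs are below) =====
def Claim_equal_get_ni_potions_py : Prop := ∀ (ings : List (String × List (String × List String))) (ni : Int), Dom_get_ni_potions_py ings ni → Pre_get_ni_potions_py ings ni → Spec_get_ni_potions_py ings ni (get_ni_potions_py ings ni)

-- ===== LEMMAS AND PROOFS =====

-- invariant of A's inner loop over the flattened effect stream s: known_effs is set(s)
-- in first-seen order; joined_effs is duplicate-free and holds exactly the effects
-- occurring at least twice in s
theorem pvStepA_inv (s : List String) :
    (s.foldl pvStepA ([], [])).2 = PySem.Set.ofList s ∧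
      (s.foldl pvStepA ([], [])).1.Nodup ∧
      ∀ x, x ∈ (s.foldl pvStepA ([], [])).1 ↔ 2 ≤ s.count x := by
  induction s using List.reverseRecOn with
  | nil => simp [PySem.Set.ofList]
  | append_singleton s e ih =>
    obtain ⟨h2, hnd, hmem⟩ := ih
    rw [List.foldl_append] at *
    have hofl : PySem.Set.ofList (s ++ [e]) = PySem.Set.add (PySem.Set.ofList s) e := by
      rw [PySem.Set.ofList_eq_foldl, List.foldl_append, ← PySem.Set.ofList_eq_foldl]; rfl
    by_cases he : e ∈ (List.foldl pvStepA ([], []) s).2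
    · have heS : e ∈ s := by rw [h2, PySem.Set.mem_ofList] at he; exact he
      have hadd : PySem.Set.add (PySem.Set.ofList s) e = PySem.Set.ofList s := by
        simp [PySem.Set.add, PySem.Set.contains, PySem.Set.mem_ofList, heS]
      have h1 : 1 ≤ s.count e := List.count_pos_iff.mpr heS
      by_cases hj : e ∈ (List.foldl pvStepA ([], []) s).1
      · simp only [List.foldl_cons, List.foldl_nil, pvStepA, he, if_true, hj]
        refine ⟨by rw [h2, hofl, hadd], hnd, fun x => ?_⟩
        rw [hmem x, List.count_append]
        rcases eq_or_ne x e with rfl | hne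
        · have := (hmem x).mp hj
          have hc : List.count x [x] = 1 := List.count_singleton_self
          omega
        · simp [Ne.symm hne]
      · simp only [List.foldl_cons, List.foldl_nil, pvStepA, he, if_true, hj, if_false]
        refine ⟨by rw [h2, hofl, hadd], ?_, fun x => ?_⟩
        · refine List.Nodup.append hnd (List.nodup_singleton e) ?_
          intro a ha hb
          simp only [List.mem_singleton] at hb
          exact hj (hb ▸ ha)
        · rw [List.mem_append, hmem x, List.count_append]
          rcases eq_or_ne x e with rfl | hne
          · simp; omega
          · simp [Ne.symm hne, hne]
    · have heS : e ∉ s := by rw [h2, PySem.Set.mem_ofList] at he; exact he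
      have h0 : s.count e = 0 := List.count_eq_zero.mpr heS
      simp only [List.foldl_cons, List.foldl_nil, pvStepA, he, if_false]
      refine ⟨?_, hnd, fun x => ?_⟩
      · rw [h2, hofl]
        simp [PySem.Set.add, PySem.Set.contains, PySem.Set.mem_ofList, heS]
      · rw [hmem x, List.count_append]
        rcases eq_or_ne x e with rfl | hne
        · simp [h0]
        · simp [Ne.symm hne]

-- A's potion of a combination is B's potion of the running counter of its flattened effects
theorem pvPotion_eq (ref : List (String × List (String × List String))) (crs : List String) :
    pvPotionA ref crs = pvPotionCnt (PySem.Dict.counter (crs.flatMap (pvEffA ref))) := by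
  simp only [pvPotionA, pvPotionCnt]
  rw [← List.foldl_flatMap, PySem.Dict.items_counter, List.filter_map, List.map_map]
  set s := crs.flatMap (pvEffA ref) with hs
  obtain ⟨-, hnd, hmem⟩ := pvStepA_inv s
  apply PySem.List.sorted_eq_sorted_of_perm _ _ _ (fun a b h => h)
  have hid : ((fun x : String × Int => x.1) ∘ fun k => (k, (List.count k s : Int))) = id := rfl
  rw [hid, List.map_id]
  have hndf : (List.filter ((fun p => decide ((2:Int) ≤ p.2)) ∘ fun k => (k, (List.count k s : Int)))
      (PySem.Set.ofList s)).Nodup := (PySem.Set.nodup_ofList s).filter _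
  rw [List.perm_ext_iff_of_nodup hnd hndf]
  intro a
  rw [hmem a]
  simp only [Function.comp, List.mem_filter, PySem.Set.mem_ofList, decide_eq_true_eq]
  constructor
  · intro h
    exact ⟨List.count_pos_iff.mp (by omega), by exact_mod_cast h⟩
  · rintro ⟨-, h⟩
    exact_mod_cast h

-- updating a set with elements it already holds leaves it unchanged
theorem pvSetUpdateSelf (s : PySem.Set String) (xs : List String) (h : ∀ x ∈ xs, x ∈ s) :
    PySem.Set.update s xs = s := by
  induction xs with
  | nil => rfl
  | cons x xs ih =>
    have hx : PySem.Set.add s x = s := by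
      simp [PySem.Set.add, PySem.Set.contains, h x (List.mem_cons_self)]
    show PySem.Set.update (PySem.Set.add s x) xs = s
    rw [hx]
    exact ih (fun y hy => h y (List.mem_cons_of_mem x hy))

-- the effects a potion keeps from a count dict, as a membership statement
theorem pvMemKept (d : PySem.Dict String Int) (hnd : d.keys.Nodup) (e : String) :
    e ∈ (d.items.filter (fun p => decide ((2 : Int) ≤ p.2))).map (·.1) ↔
      e ∈ d.keys ∧ 2 ≤ d.getD e 0 := by
  constructor
  · intro h
    obtain ⟨p, hp, rfl⟩ := List.mem_map.mp h
    obtain ⟨hpi, hp2⟩ := List.mem_filter.mp hp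
    refine ⟨PySem.Dict.mem_keys_of_mem_items d hpi, ?_⟩
    have hget : d.get? p.1 = some p.2 :=
      PySem.Dict.get?_of_mem_items d (Prod.mk.eta ▸ hpi) hnd
    rw [PySem.Dict.getD_of_get?_eq_some d 0 hget]
    exact of_decide_eq_true hp2
  · rintro ⟨hk, h2⟩
    have hc : d.contains e = true := (PySem.Dict.contains_iff_mem_keys d e).mpr hk
    obtain ⟨v, hv⟩ : ∃ v, d.get? e = some v := by
      have := PySem.Dict.contains_eq_isSome_get? (d := d) (k := e)
      rw [hc] at this
      exact Option.isSome_iff_exists.mp this.symm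
    have hgd : d.getD e 0 = v := PySem.Dict.getD_of_get?_eq_some d 0 hv
    refine List.mem_map.mpr ⟨(e, v), List.mem_filter.mpr
      ⟨PySem.Dict.mem_items_of_get?_eq_some d hv, decide_eq_true (hgd ▸ h2)⟩, rfl⟩

-- the kept-effect list has no duplicates (it projects a sublist of the key list)
theorem pvNodupKept (d : PySem.Dict String Int) (hnd : d.keys.Nodup) :
    ((d.items.filter (fun p => decide ((2 : Int) ≤ p.2))).map (·.1)).Nodup := by
  have hsub : List.Sublist ((d.items.filter (fun p => decide ((2 : Int) ≤ p.2))).map (·.1))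
      (d.items.map (·.1)) := (List.filter_sublist).map _
  exact hnd.sublist hsub

-- the decrement loop subtracts the ingredient's effect counts
theorem pvDec_getD (M : List String) (d : PySem.Dict String Int) (e : String) :
    (M.foldl (fun c x => c.modify x 0 (· - 1)) d).getD e 0 = d.getD e 0 - M.count e := by
  induction M generalizing d with
  | nil => simp
  | cons x M ih =>
    rw [List.foldl_cons, ih, PySem.Dict.getD_modify, List.count_cons]
    rcases eq_or_ne e x with rfl | hne
    · simp; omega
    · simp [hne, Ne.symm hne]

-- decrementing by an ingredient's effects equals A's potion of the leave-one-out combination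
theorem pvPotionDec_eq (ref : List (String × List (String × List String)))
    (chosen : List String) (i : Nat) (hi : i < chosen.length) :
    pvPotionCnt ((pvEffA ref chosen[i]).foldl (fun c e => c.modify e 0 (· - 1))
        (PySem.Dict.counter (chosen.flatMap (pvEffA ref)))) =
      pvPotionA ref (chosen.eraseIdx i) := by
  set M := pvEffA ref chosen[i] with hM
  set L := chosen.flatMap (pvEffA ref) with hL
  set L' := (chosen.eraseIdx i).flatMap (pvEffA ref) with hL'
  have hperm : L.Perm (M ++ L') := by
    have h1 : chosen.Perm (chosen[i] :: chosen.eraseIdx i) :=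
      (List.perm_cons_erase (chosen.getElem_mem hi)).trans
        ((List.erase_getElem hi).cons chosen[i])
    simpa [hL, hL', hM, List.flatMap_cons] using h1.flatMap (fun a _ => List.Perm.refl (pvEffA ref a))
  have hcnt : ∀ e, L.count e = M.count e + L'.count e := by
    intro e
    rw [hperm.count_eq, List.count_append]
  have hsub : ∀ x ∈ M, x ∈ L := by
    intro x hx
    exact List.mem_flatMap.mpr ⟨chosen[i], chosen.getElem_mem hi, hx⟩
  set d := M.foldl (fun c e => c.modify e 0 (· - 1))
      (PySem.Dict.counter L) with hd
  have hkeys : d.keys = PySem.Set.ofList L := by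
    rw [hd, PySem.Dict.keys_foldl_modify, PySem.Dict.keys_counter]
    exact pvSetUpdateSelf _ _ (fun x hx => (PySem.Set.mem_ofList _ _).mpr (hsub x hx))
  have hnd : d.keys.Nodup := by rw [hkeys]; exact PySem.Set.nodup_ofList L
  have hgetD : ∀ e, d.getD e 0 = (L.count e : Int) - M.count e := by
    intro e
    rw [hd, pvDec_getD, PySem.Dict.getD_counter]
  rw [pvPotion_eq ref (chosen.eraseIdx i)]
  unfold pvPotionCnt
  apply PySem.List.sorted_eq_sorted_of_perm _ _ _ (fun a b h => h)
  have hndC : (PySem.Dict.counter L').keys.Nodup := PySem.Dict.nodup_keys_counter L'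
  rw [List.perm_ext_iff_of_nodup (pvNodupKept d hnd) (pvNodupKept _ hndC)]
  intro e
  rw [pvMemKept d hnd e, pvMemKept _ hndC e, hkeys, PySem.Set.mem_ofList,
    PySem.Dict.keys_counter, PySem.Set.mem_ofList, hgetD, PySem.Dict.getD_counter]
  have hc := hcnt e
  constructor
  · rintro ⟨-, h⟩
    have h2 : 2 ≤ L'.count e := by omega
    exact ⟨List.count_pos_iff.mp (by omega), by exact_mod_cast h2⟩
  · rintro ⟨hmem, h⟩
    have h2 : 2 ≤ L'.count e := by exact_mod_cast h
    refine ⟨List.count_pos_iff.mp (by omega), by omega⟩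

-- itertools.combinations(cr, len(cr)-1) is the leave-one-out family, highest index first
theorem pvCombos_eraseIdx (x : String) (xs : List String) :
    PySem.List.combinations (x :: xs) xs.length =
      ((List.range (xs.length + 1)).map ((x :: xs).eraseIdx ·)).reverse := by
  induction xs generalizing x with
  | nil => simp [PySem.List.combinations_zero]
  | cons y ys ih =>
    rw [show (y :: ys).length = ys.length + 1 from rfl, PySem.List.combinations_cons_succ, ih y]
    have hself : PySem.List.combinations (y :: ys) (ys.length + 1) = [y :: ys] := by
      simpa using PySem.List.combinations_length_self (y :: ys)
    rw [hself]
    conv_rhs => rw [List.range_succ_eq_map, List.map_cons, List.reverse_cons, List.map_map,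
      List.eraseIdx_cons_zero]
    simp only [← List.map_reverse, List.map_map]
    rfl

-- B's visit on the running counter is A's per-combination loop body
theorem pvVisit_eq (ref : List (String × List (String × List String))) (chosen : List String)
    (out : PySem.Dict (List String) (List (List String))) :
    pvVisitB ref chosen (PySem.Dict.counter (chosen.flatMap (pvEffB ref))) out =
      pvOuterA ref out chosen := by
  have hEff : pvEffB ref = pvEffA ref := rfl
  have hce : pvPotionCnt (PySem.Dict.counter (chosen.flatMap (pvEffB ref))) =
      pvPotionA ref chosen := by rw [hEff]; exact (pvPotion_eq ref chosen).symm
  have hany : ¬ chosen.length ≤ 2 →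
      (chosen.any (fun ci =>
        pvPotionCnt ((pvEffB ref ci).foldl (fun c e => c.modify e 0 (· - 1))
          (PySem.Dict.counter (chosen.flatMap (pvEffB ref)))) == pvPotionA ref chosen)) =
      (PySem.List.combinations chosen (chosen.length - 1)).any
        (fun c => pvPotionA ref c == pvPotionA ref chosen) := by
    intro hlen
    match chosen, hlen with
    | x :: xs, hlen =>
    rw [show (x :: xs).length - 1 = xs.length from rfl, pvCombos_eraseIdx, List.any_reverse,
      List.any_map]
    rw [Bool.eq_iff_iff]
    simp only [List.any_eq_true, List.mem_range, Function.comp_def]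
    constructor
    · rintro ⟨ci, hci, hg⟩
      obtain ⟨i, hi, rfl⟩ := List.getElem_of_mem hci
      refine ⟨i, by simpa using hi, ?_⟩
      rw [hEff] at hg
      rwa [pvPotionDec_eq ref (x :: xs) i hi] at hg
    · rintro ⟨i, hi, hg⟩
      have hi' : i < (x :: xs).length := by simpa using hi
      refine ⟨(x :: xs)[i], List.getElem_mem hi', ?_⟩
      rw [hEff, pvPotionDec_eq ref (x :: xs) i hi']
      exact hg
  have hnt : pvNontrivA ref chosen =
      ((if chosen.length ≤ 2 then decide (0 < (pvPotionA ref chosen).length)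
        else !(chosen.any (fun ci =>
          pvPotionCnt ((pvEffB ref ci).foldl (fun c e => c.modify e 0 (· - 1))
            (PySem.Dict.counter (chosen.flatMap (pvEffB ref)))) == pvPotionA ref chosen))),
        pvPotionA ref chosen) := by
    simp only [pvNontrivA]
    by_cases hlen : chosen.length ≤ 2
    · simp [hlen]
    · rw [if_neg hlen, if_neg hlen, hany hlen]
      cases h : (PySem.List.combinations chosen (chosen.length - 1)).any
          (fun c => pvPotionA ref c == pvPotionA ref chosen) <;> simp_all
  simp only [pvVisitB, pvOuterA, hnt, hce]
  by_cases hb : (if chosen.length ≤ 2 then decide (0 < (pvPotionA ref chosen).length)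
      else !(chosen.any (fun ci =>
        pvPotionCnt ((pvEffB ref ci).foldl (fun c e => c.modify e 0 (· - 1))
          (PySem.Dict.counter (chosen.flatMap (pvEffB ref)))) == pvPotionA ref chosen))) = true
  · rw [if_pos hb, if_pos hb]
    by_cases hc : out.contains (pvPotionA ref chosen) = true
    · rw [if_pos hc, PySem.Dict.setdefault_of_contains _ _ hc]
    · rw [if_neg hc, PySem.Dict.setdefault_of_not_contains _ _ (by simpa using hc)]
  · rw [if_neg hb, if_neg hb]

-- B's DFS is A's fold over itertools.combinations
theorem pvRec_eq (ref : List (String × List (String × List String))) (names : List String)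
    (k : Nat) (chosen : List String) (cnt : PySem.Dict String Int)
    (out : PySem.Dict (List String) (List (List String))) :
    pvRecB ref names k chosen cnt out =
      (PySem.List.combinations names k).foldl
        (fun o s => pvVisitB ref (chosen ++ s)
          ((s.flatMap (pvEffB ref)).foldl (fun c e => c.modify e 0 (· + 1)) cnt) o) out := by
  induction names generalizing k chosen cnt out with
  | nil =>
    cases k with
    | zero => simp [pvRecB, PySem.List.combinations_zero]
    | succ k => simp [pvRecB, PySem.List.combinations_nil_succ]
  | cons x xs ih =>
    cases k with
    | zero => simp [pvRecB, PySem.List.combinations_zero]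
    | succ k =>
      by_cases hlen : (x :: xs).length < k + 1
      · rw [PySem.List.combinations_eq_nil_of_length_lt (x :: xs) hlen]
        simp only [pvRecB]
        rw [if_pos hlen]
        rfl
      · simp only [pvRecB]
        rw [if_neg hlen, PySem.List.combinations_cons_succ, List.foldl_append, List.foldl_map,
          ih, ih]
        congr 1
        congr 1
        funext o s
        simp [List.flatMap_cons, List.foldl_append, List.append_assoc]

-- ===== VERDICT (by name: the statement is the Claim_ definition above) =====
theorem get_ni_potions_py_spec : Claim_equal_get_ni_potions_py := by
  intro ings ni _ _
  unfold Spec_get_ni_potions_py get_ni_potions_py get_ni_potions_py_alt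
  rw [pvRec_eq]
  congr 1
  apply PySem.List.foldl_congr_mem
  intro out s _
  simp only [List.nil_append]
  exact (pvVisit_eq ings s out).symm
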